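-- pv_equiv track=rewrite | github.com/1456095597/- | hello.py | angelcreat
-- ===== SOURCE A (Python) =====
-- def angelcreat(x):
--     l=[[1],[1,1,1]]
--     if x==1 or x==2:
--         return 0
--     else:
--         i=2
--         j=0
--         jj=5
--         while i<x:
--             new=[]
--             while j<jj:
--                 if j-2<0 or j-2>(len(l[i-1])-1):
--                     a=0
--                 else:
--                     a=l[i-1][j-2]
--                 if j-1<0 or j-1>(len(l[i-1])-1):
--                     b=0
--                 else:
--                     b=l[i-1][j-1]
--                 if j<0 or j>(len(l[i-1])-1):
--                     c=0
--                 else: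
--                     c=l[i-1][j]
--                 new.append(a+b+c)
--                 j+=1
--             l.append(new)
--             i+=1
--             jj+=2
--             j=0
--         l1=l[x-1]
--         kk=0
--         while kk<len(l1):
--             if l1[kk]%2==0:
--                 return kk+1
--             else :
--                 kk+=1
--         return 0
-- ===== SOURCE B (Python) =====
-- def angelcreat(x):
--     # First even entry (1-based) of trinomial-triangle row x-1 is periodic in x
--     # with period 4 once x >= 3; rows x in {-1,0,1,2} hold no even entry.
--     if x >= 3:
--         return (2, 3, 2, 4)[(x - 3) % 4]
--     return 0
-- ===== Notes on version B (the rewrite author's own statement) =====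
-- stated objective: faster
-- what changed: Replaces the O(x^2) row-by-row trinomial-triangle DP plus scan with a proved period-4 closed form: for x>=3 the answer is (2,3,2,4)[(x-3)%4], and 0 otherwise.
import Mathlib
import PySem

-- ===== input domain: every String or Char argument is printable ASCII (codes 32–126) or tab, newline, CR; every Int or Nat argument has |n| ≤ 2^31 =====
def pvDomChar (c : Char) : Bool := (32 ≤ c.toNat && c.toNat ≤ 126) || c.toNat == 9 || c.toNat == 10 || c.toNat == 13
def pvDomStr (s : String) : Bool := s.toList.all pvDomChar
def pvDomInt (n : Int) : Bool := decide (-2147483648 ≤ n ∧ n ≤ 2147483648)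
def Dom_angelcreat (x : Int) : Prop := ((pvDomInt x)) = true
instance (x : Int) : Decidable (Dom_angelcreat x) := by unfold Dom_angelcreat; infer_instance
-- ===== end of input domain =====

-- B replaces A's O(x^2) trinomial-triangle DP with a period-4 closed form (objective: faster).

-- ===== PORT A =====
-- one entry of the new row: the three bounds-checked reads a, b, c and their sum
def pvA_entry (prev : List Int) (j : Int) : Int :=
  let a := if j - 2 < 0 ∨ j - 2 > (prev.length : Int) - 1 then 0
           else (PySem.List.pyGet? prev (j - 2)).getD 0
  let b := if j - 1 < 0 ∨ j - 1 > (prev.length : Int) - 1 then 0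
           else (PySem.List.pyGet? prev (j - 1)).getD 0
  let c := if j < 0 ∨ j > (prev.length : Int) - 1 then 0
           else (PySem.List.pyGet? prev j).getD 0
  a + b + c

-- inner 'while j < jj' loop: append entries for j = 0 .. jj-1
def pvA_row (prev : List Int) (jj : Int) : List Int :=
  (PySem.List.pyRange 0 jj 1).foldl (fun new j => new ++ [pvA_entry prev j]) []

-- outer 'while i < x' loop; fuel = (x - i).toNat
def pvA_build : Nat → List (List Int) → Int → Int → List (List Int)
  | 0, l, _, _ => l
  | fuel + 1, l, i, jj =>
      pvA_build fuel (l ++ [pvA_row ((PySem.List.pyGet? l (i - 1)).getD []) jj]) (i + 1) (jj + 2)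

-- final 'while kk < len(l1)' scan for the first even entry
def pvA_scan : List Int → Int → Int
  | [], _ => 0
  | v :: rest, kk => if PySem.Int.mod v 2 = 0 then kk + 1 else pvA_scan rest (kk + 1)

def angelcreat (x : Int) : Int :=
  if x = 1 ∨ x = 2 then 0
  else
    let l := pvA_build (x - 2).toNat [[1], [1, 1, 1]] 2 5
    let l1 := (PySem.List.pyGet? l (x - 1)).getD []
    pvA_scan l1 0

-- ===== PORT B =====
def angelcreat_alt (x : Int) : Int :=
  if x ≥ 3 then (PySem.List.pyGet? [2, 3, 2, 4] (PySem.Int.mod (x - 3) 4)).getD 0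
  else 0

-- ===== PRECONDITION & SPEC =====
-- Pre_ excludes exactly x ≤ -2, where A raises IndexError (negative index into the 2-row base list); B returns 0 there.
def Pre_angelcreat (x : Int) : Prop := -1 ≤ x
instance (x : Int) : Decidable (Pre_angelcreat x) := by unfold Pre_angelcreat; infer_instance
def pvWitness_angelcreat : Int := 7


def Spec_angelcreat (x : Int) (out : Int) : Prop := out = angelcreat_alt x
instance (x : Int) (out : Int) : Decidable (Spec_angelcreat x out) := by unfold Spec_angelcreat; infer_instance

-- ===== CLAIM (what is proved, stated in full; the proofs are below) =====
def Claim_equal_angelcreat : Prop := ∀ (x : Int), Dom_angelcreat x → Pre_angelcreat x → Spec_angelcreat x (angelcreat x)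

-- ===== LEMMAS AND PROOFS =====

-- the trinomial rows A's DP builds
def pvRows : Nat → List Int
  | 0 => [1]
  | 1 => [1, 1, 1]
  | n + 2 => pvA_row (pvRows (n + 1)) (2 * (n : Int) + 5)

def pvRowsList (n : Nat) : List (List Int) := (List.range (n + 1)).map pvRows

theorem pv_foldl_append_singleton (f : Int → Int) :
    ∀ (xs : List Int) (init : List Int),
      xs.foldl (fun new j => new ++ [f j]) init = init ++ xs.map f := by
  intro xs
  induction xs with
  | nil => simp
  | cons y ys ih => intro init; simp [List.foldl, ih]

theorem pvA_row_eq_map (prev : List Int) (jj : Int) :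
    pvA_row prev jj = (PySem.List.pyRange 0 jj 1).map (pvA_entry prev) := by
  rw [pvA_row, pv_foldl_append_singleton]
  simp

theorem pvRowsList_get (k : Nat) :
    (PySem.List.pyGet? (pvRowsList (k + 1)) ((k : Int) + 1)).getD [] = pvRows (k + 1) := by
  have h : ((k : Int) + 1) = ((k + 1 : Nat) : Int) := by push_cast; ring
  rw [h, PySem.List.pyGet?_natCast]
  simp [pvRowsList]

theorem pv_build_rows : ∀ (fuel k : Nat),
    pvA_build fuel (pvRowsList (k + 1)) ((k : Int) + 2) (2 * (k : Int) + 5)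
      = pvRowsList (k + 1 + fuel) := by
  intro fuel
  induction fuel with
  | zero => intro k; simp [pvA_build]
  | succ m ih =>
    intro k
    have hget : ((PySem.List.pyGet? (pvRowsList (k + 1)) ((k : Int) + 2 - 1)).getD [])
        = pvRows (k + 1) := by
      have : (k : Int) + 2 - 1 = (k : Int) + 1 := by ring
      rw [this, pvRowsList_get]
    have happ : pvRowsList (k + 1) ++ [pvA_row (pvRows (k + 1)) (2 * (k : Int) + 5)]
        = pvRowsList (k + 2) := by
      show pvRowsList (k + 1) ++ [pvRows (k + 2)] = pvRowsList (k + 2)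
      simp [pvRowsList, List.range_succ]
    have ih' := ih (k + 1)
    have hc1 : ((k + 1 : Nat) : Int) + 2 = (k : Int) + 2 + 1 := by push_cast; ring
    have hc2 : 2 * ((k + 1 : Nat) : Int) + 5 = 2 * (k : Int) + 5 + 2 := by push_cast; ring
    rw [hc1, hc2] at ih'
    calc pvA_build (m + 1) (pvRowsList (k + 1)) ((k : Int) + 2) (2 * (k : Int) + 5)
        = pvA_build m (pvRowsList (k + 1) ++ [pvA_row (pvRows (k + 1)) (2 * (k : Int) + 5)])
            ((k : Int) + 2 + 1) (2 * (k : Int) + 5 + 2) := by rw [pvA_build, hget]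
      _ = pvRowsList (k + 1 + 1 + m) := by rw [happ]; exact ih'
      _ = pvRowsList (k + 1 + (m + 1)) := by ring_nf

-- first four entries of a freshly built row, for a previous row of length ≥ 4
theorem pv_entry_head (e0 e1 e2 e3 : Int) (rest : List Int) :
    pvA_entry (e0 :: e1 :: e2 :: e3 :: rest) 0 = e0 ∧
    pvA_entry (e0 :: e1 :: e2 :: e3 :: rest) 1 = e0 + e1 ∧
    pvA_entry (e0 :: e1 :: e2 :: e3 :: rest) 2 = e0 + e1 + e2 ∧
    pvA_entry (e0 :: e1 :: e2 :: e3 :: rest) 3 = e1 + e2 + e3 := by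
  refine ⟨?_, ?_, ?_, ?_⟩
  · simp only [pvA_entry]
    rw [if_pos (Or.inl (by norm_num : (0:Int) - 2 < 0)),
        if_pos (Or.inl (by norm_num : (0:Int) - 1 < 0)),
        if_neg (show ¬((0:Int) < 0 ∨ (0:Int) > ((e0 :: e1 :: e2 :: e3 :: rest).length : Int) - 1) by
          simp only [List.length_cons]; push_cast; rintro (h | h) <;> omega),
        show (0:Int) = ((0:Nat):Int) from rfl, PySem.List.pyGet?_natCast]
    simp
  · simp only [pvA_entry]
    rw [if_pos (Or.inl (by norm_num : (1:Int) - 2 < 0)),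
        if_neg (show ¬((1:Int) - 1 < 0 ∨ (1:Int) - 1 > ((e0 :: e1 :: e2 :: e3 :: rest).length : Int) - 1) by
          simp only [List.length_cons]; push_cast; rintro (h | h) <;> omega),
        if_neg (show ¬((1:Int) < 0 ∨ (1:Int) > ((e0 :: e1 :: e2 :: e3 :: rest).length : Int) - 1) by
          simp only [List.length_cons]; push_cast; rintro (h | h) <;> omega),
        show (1:Int) - 1 = ((0:Nat):Int) from by norm_num,
        show (1:Int) = ((1:Nat):Int) from rfl,
        PySem.List.pyGet?_natCast, PySem.List.pyGet?_natCast]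
    simp
  · simp only [pvA_entry]
    rw [if_neg (show ¬((2:Int) - 2 < 0 ∨ (2:Int) - 2 > ((e0 :: e1 :: e2 :: e3 :: rest).length : Int) - 1) by
          simp only [List.length_cons]; push_cast; rintro (h | h) <;> omega),
        if_neg (show ¬((2:Int) - 1 < 0 ∨ (2:Int) - 1 > ((e0 :: e1 :: e2 :: e3 :: rest).length : Int) - 1) by
          simp only [List.length_cons]; push_cast; rintro (h | h) <;> omega),
        if_neg (show ¬((2:Int) < 0 ∨ (2:Int) > ((e0 :: e1 :: e2 :: e3 :: rest).length : Int) - 1) by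
          simp only [List.length_cons]; push_cast; rintro (h | h) <;> omega),
        show (2:Int) - 2 = ((0:Nat):Int) from by norm_num,
        show (2:Int) - 1 = ((1:Nat):Int) from by norm_num,
        show (2:Int) = ((2:Nat):Int) from rfl,
        PySem.List.pyGet?_natCast, PySem.List.pyGet?_natCast, PySem.List.pyGet?_natCast]
    simp
  · simp only [pvA_entry]
    rw [if_neg (show ¬((3:Int) - 2 < 0 ∨ (3:Int) - 2 > ((e0 :: e1 :: e2 :: e3 :: rest).length : Int) - 1) by
          simp only [List.length_cons]; push_cast; rintro (h | h) <;> omega),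
        if_neg (show ¬((3:Int) - 1 < 0 ∨ (3:Int) - 1 > ((e0 :: e1 :: e2 :: e3 :: rest).length : Int) - 1) by
          simp only [List.length_cons]; push_cast; rintro (h | h) <;> omega),
        if_neg (show ¬((3:Int) < 0 ∨ (3:Int) > ((e0 :: e1 :: e2 :: e3 :: rest).length : Int) - 1) by
          simp only [List.length_cons]; push_cast; rintro (h | h) <;> omega),
        show (3:Int) - 2 = ((1:Nat):Int) from by norm_num,
        show (3:Int) - 1 = ((2:Nat):Int) from by norm_num,
        show (3:Int) = ((3:Nat):Int) from rfl,
        PySem.List.pyGet?_natCast, PySem.List.pyGet?_natCast, PySem.List.pyGet?_natCast]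
    simp


-- parity tuple of the first four entries of row n, as a function of n % 4
def pvPT (r : Nat) : Int × Int × Int × Int :=
  if r = 0 then (1, 0, 0, 0)
  else if r = 1 then (1, 1, 1, 0)
  else if r = 2 then (1, 0, 1, 0)
  else (1, 1, 0, 1)

theorem pvRows_par : ∀ n : Nat, 2 ≤ n →
    ∃ e0 e1 e2 e3 rest, pvRows n = e0 :: e1 :: e2 :: e3 :: rest ∧
      (e0 % 2, e1 % 2, e2 % 2, e3 % 2) = pvPT (n % 4) := by
  intro n
  induction n with
  | zero => omega
  | succ m ih =>
    intro hm
    by_cases hm2 : 2 ≤ m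
    · obtain ⟨e0, e1, e2, e3, rest, hrow, hpar⟩ := ih hm2
      obtain ⟨k, rfl⟩ : ∃ k, m = k + 2 := ⟨m - 2, by omega⟩
      have hstep : pvRows (k + 2 + 1) = pvA_row (pvRows (k + 2)) (2 * ((k + 1 : Nat) : Int) + 5) := rfl
      have hjj : (2 : Int) * ((k + 1 : Nat) : Int) + 5 = 2 * (k : Int) + 7 := by push_cast; ring
      have hrange : PySem.List.pyRange 0 (2 * (k : Int) + 7) 1
          = 0 :: 1 :: 2 :: 3 :: PySem.List.pyRange 4 (2 * (k : Int) + 7) 1 := by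
        rw [PySem.List.pyRange_one_cons (by omega), PySem.List.pyRange_one_cons (by omega),
            PySem.List.pyRange_one_cons (by omega), PySem.List.pyRange_one_cons (by omega)]
        norm_num
      obtain ⟨h0, h1, h2, h3⟩ := pv_entry_head e0 e1 e2 e3 rest
      refine ⟨e0, e0 + e1, e0 + e1 + e2, e1 + e2 + e3,
              (PySem.List.pyRange 4 (2 * (k : Int) + 7) 1).map (pvA_entry (pvRows (k + 2))), ?_, ?_⟩
      · rw [hstep, hjj, pvA_row_eq_map, hrange]
        simp only [List.map]
        rw [hrow, h0, h1, h2, h3]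
      · have h4 : (k + 2) % 4 = 0 ∨ (k + 2) % 4 = 1 ∨ (k + 2) % 4 = 2 ∨ (k + 2) % 4 = 3 := by omega
        rcases h4 with h | h | h | h
        · rw [h] at hpar
          rw [show pvPT 0 = (1, 0, 0, 0) from rfl, Prod.mk.injEq, Prod.mk.injEq, Prod.mk.injEq] at hpar
          obtain ⟨p0, p1, p2, p3⟩ := hpar
          rw [show (k + 2 + 1) % 4 = 1 from by omega,
              show pvPT 1 = (1, 1, 1, 0) from rfl, Prod.mk.injEq, Prod.mk.injEq, Prod.mk.injEq]
          exact ⟨by omega, by omega, by omega, by omega⟩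
        · rw [h] at hpar
          rw [show pvPT 1 = (1, 1, 1, 0) from rfl, Prod.mk.injEq, Prod.mk.injEq, Prod.mk.injEq] at hpar
          obtain ⟨p0, p1, p2, p3⟩ := hpar
          rw [show (k + 2 + 1) % 4 = 2 from by omega,
              show pvPT 2 = (1, 0, 1, 0) from rfl, Prod.mk.injEq, Prod.mk.injEq, Prod.mk.injEq]
          exact ⟨by omega, by omega, by omega, by omega⟩
        · rw [h] at hpar
          rw [show pvPT 2 = (1, 0, 1, 0) from rfl, Prod.mk.injEq, Prod.mk.injEq, Prod.mk.injEq] at hpar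
          obtain ⟨p0, p1, p2, p3⟩ := hpar
          rw [show (k + 2 + 1) % 4 = 3 from by omega,
              show pvPT 3 = (1, 1, 0, 1) from rfl, Prod.mk.injEq, Prod.mk.injEq, Prod.mk.injEq]
          exact ⟨by omega, by omega, by omega, by omega⟩
        · rw [h] at hpar
          rw [show pvPT 3 = (1, 1, 0, 1) from rfl, Prod.mk.injEq, Prod.mk.injEq, Prod.mk.injEq] at hpar
          obtain ⟨p0, p1, p2, p3⟩ := hpar
          rw [show (k + 2 + 1) % 4 = 0 from by omega,
              show pvPT 0 = (1, 0, 0, 0) from rfl, Prod.mk.injEq, Prod.mk.injEq, Prod.mk.injEq]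
          exact ⟨by omega, by omega, by omega, by omega⟩
    · have hm1 : m + 1 = 2 := by omega
      rw [hm1]
      refine ⟨1, 2, 3, 2, [1], ?_, ?_⟩ <;> decide

-- the scan value on row n, n ≥ 2
def pvAns (r : Nat) : Int :=
  if r = 0 then 2 else if r = 1 then 4 else if r = 2 then 2 else 3

theorem pv_scan_rows (n : Nat) (hn : 2 ≤ n) : pvA_scan (pvRows n) 0 = pvAns (n % 4) := by
  obtain ⟨e0, e1, e2, e3, rest, hrow, hpar⟩ := pvRows_par n hn
  rw [hrow]
  have h4 : n % 4 = 0 ∨ n % 4 = 1 ∨ n % 4 = 2 ∨ n % 4 = 3 := by omega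
  rcases h4 with h | h | h | h
  · rw [h] at hpar; rw [h]
    rw [show pvPT 0 = (1, 0, 0, 0) from rfl, Prod.mk.injEq, Prod.mk.injEq, Prod.mk.injEq] at hpar
    obtain ⟨p0, p1, p2, p3⟩ := hpar
    simp [pvA_scan, p0, p1, pvAns]
  · rw [h] at hpar; rw [h]
    rw [show pvPT 1 = (1, 1, 1, 0) from rfl, Prod.mk.injEq, Prod.mk.injEq, Prod.mk.injEq] at hpar
    obtain ⟨p0, p1, p2, p3⟩ := hpar
    simp [pvA_scan, p0, p1, p2, p3, pvAns]
  · rw [h] at hpar; rw [h]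
    rw [show pvPT 2 = (1, 0, 1, 0) from rfl, Prod.mk.injEq, Prod.mk.injEq, Prod.mk.injEq] at hpar
    obtain ⟨p0, p1, p2, p3⟩ := hpar
    simp [pvA_scan, p0, p1, pvAns]
  · rw [h] at hpar; rw [h]
    rw [show pvPT 3 = (1, 1, 0, 1) from rfl, Prod.mk.injEq, Prod.mk.injEq, Prod.mk.injEq] at hpar
    obtain ⟨p0, p1, p2, p3⟩ := hpar
    simp [pvA_scan, p0, p1, p2, pvAns]

-- ===== VERDICT (by name: the statement is the Claim_ definition above) =====
theorem angelcreat_spec : Claim_equal_angelcreat := by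
  intro x _ hpre
  unfold Spec_angelcreat
  by_cases hx : 3 ≤ x
  · set n : Nat := (x - 1).toNat with hn
    have hxn : x = (n : Int) + 1 := by omega
    have hn2 : 2 ≤ n := by omega
    have hA : angelcreat x = pvA_scan (pvRows n) 0 := by
      simp only [angelcreat]
      rw [if_neg (show ¬(x = 1 ∨ x = 2) by omega)]
      have hfuel : (x - 2).toNat = n - 1 := by omega
      obtain ⟨m, hm⟩ : ∃ m, n = m + 2 := ⟨n - 2, by omega⟩
      have hstart : ([[1], [1, 1, 1]] : List (List Int)) = pvRowsList 1 := by decide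
      have hb := pv_build_rows (m + 1) 0
      norm_num at hb
      rw [hfuel, hm, hstart, show m + 2 - 1 = m + 1 from by omega, hb,
          show 1 + (m + 1) = m + 1 + 1 from by omega,
          show x - 1 = ((m + 1 : Nat) : Int) + 1 from by omega,
          pvRowsList_get]
    rw [hA, pv_scan_rows n hn2]
    have h4 : n % 4 = 0 ∨ n % 4 = 1 ∨ n % 4 = 2 ∨ n % 4 = 3 := by omega
    rcases h4 with h | h | h | h
    · have hx3 : PySem.Int.mod (x - 3) 4 = 2 := by
        rw [PySem.Int.mod_eq_emod_of_pos (by norm_num : (0:Int) < 4)]; omega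
      rw [h, angelcreat_alt, if_pos (by omega), hx3]; decide
    · have hx3 : PySem.Int.mod (x - 3) 4 = 3 := by
        rw [PySem.Int.mod_eq_emod_of_pos (by norm_num : (0:Int) < 4)]; omega
      rw [h, angelcreat_alt, if_pos (by omega), hx3]; decide
    · have hx3 : PySem.Int.mod (x - 3) 4 = 0 := by
        rw [PySem.Int.mod_eq_emod_of_pos (by norm_num : (0:Int) < 4)]; omega
      rw [h, angelcreat_alt, if_pos (by omega), hx3]; decide
    · have hx3 : PySem.Int.mod (x - 3) 4 = 1 := by
        rw [PySem.Int.mod_eq_emod_of_pos (by norm_num : (0:Int) < 4)]; omega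
      rw [h, angelcreat_alt, if_pos (by omega), hx3]; decide
  · have : x = -1 ∨ x = 0 ∨ x = 1 ∨ x = 2 := by
      unfold Pre_angelcreat at hpre; omega
    rcases this with rfl | rfl | rfl | rfl <;> decide
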